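-- pv_equiv track=rewrite | github.com/andypymont/adventofcode | 2021/day17.py | x_hit
-- ===== SOURCE A (Python) =====
-- def x_hit(velx: int, lowx: int, highx: int) -> bool:
--     x = 0
--     while velx >= 0:
--         if lowx <= x <= highx:
--             return True
--         x += velx
--         velx -= 1
--     return False
-- ===== SOURCE B (Python) =====
-- def x_hit(velx: int, lowx: int, highx: int) -> bool:
--     # positions visited are pos(k) = k*velx - k*(k-1)//2 for k = 0..velx,
--     # a nondecreasing sequence: binary-search the first k with pos(k) >= lowx.
--     if velx < 0:
--         return False
--     def pos(k):
--         return k * velx - k * (k - 1) // 2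
--     if pos(velx) < lowx:
--         return False
--     lo, hi = 0, velx
--     while lo < hi:
--         mid = (lo + hi) // 2
--         if lowx <= pos(mid):
--             hi = mid
--         else:
--             lo = mid + 1
--     return pos(lo) <= highx
-- ===== Notes on version B (the rewrite author's own statement) =====
-- stated objective: faster
-- what changed: Replaces A's step-by-step simulation of the probe's x positions by a closed-form position formula pos(k) = k*velx - k*(k-1)//2 and a binary search over the nondecreasing sequence for the first position >= lowx.
import Mathlib
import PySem

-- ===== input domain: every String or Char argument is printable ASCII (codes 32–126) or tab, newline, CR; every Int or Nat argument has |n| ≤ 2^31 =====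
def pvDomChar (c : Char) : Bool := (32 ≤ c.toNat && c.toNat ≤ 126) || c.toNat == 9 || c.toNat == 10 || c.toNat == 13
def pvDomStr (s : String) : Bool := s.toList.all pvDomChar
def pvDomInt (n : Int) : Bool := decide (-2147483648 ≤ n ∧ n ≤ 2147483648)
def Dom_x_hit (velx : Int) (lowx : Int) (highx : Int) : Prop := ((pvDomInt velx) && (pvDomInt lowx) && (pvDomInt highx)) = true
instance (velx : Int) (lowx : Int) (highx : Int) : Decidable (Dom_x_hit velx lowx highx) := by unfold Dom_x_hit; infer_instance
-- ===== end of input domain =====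

-- B replaces A's step-by-step simulation (O(velx) steps) by a binary search over the
-- closed-form nondecreasing positions pos(k) = k*velx - k*(k-1)//2 (O(log velx)).

-- ===== PORT A =====
-- the while loop: state (velx, x), velx decreases each iteration
def x_hit_go (velx : Int) (x : Int) (lowx : Int) (highx : Int) : Bool :=
  if 0 ≤ velx then
    if lowx ≤ x ∧ x ≤ highx then true
    else x_hit_go (velx - 1) (x + velx) lowx highx
  else false
termination_by (velx + 1).toNat
decreasing_by omega

def x_hit (velx : Int) (lowx : Int) (highx : Int) : Bool :=
  x_hit_go velx 0 lowx highx

-- ===== PORT B =====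
-- pos(k) = k*velx - k*(k-1)//2
def pvPos (velx : Int) (k : Int) : Int :=
  k * velx - PySem.Int.floordiv (k * (k - 1)) 2

-- the binary-search while loop of Source B
def x_hit_bs (velx : Int) (lowx : Int) (lo : Int) (hi : Int) : Int :=
  if lo < hi then
    let mid := PySem.Int.floordiv (lo + hi) 2
    if lowx ≤ pvPos velx mid then x_hit_bs velx lowx lo mid
    else x_hit_bs velx lowx (mid + 1) hi
  else lo
termination_by (hi - lo).toNat
decreasing_by
  all_goals
    have h := PySem.Int.floordiv_two_mid_bounds (lo := lo) (hi := hi) (by omega)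
    have h2 : PySem.Int.floordiv (lo + hi) 2 < hi := by
      rw [PySem.Int.floordiv_eq_ediv_of_pos (by omega)]; omega
    omega

def x_hit_alt (velx : Int) (lowx : Int) (highx : Int) : Bool :=
  if velx < 0 then false
  else if pvPos velx velx < lowx then false
  else
    let lo := x_hit_bs velx lowx 0 velx
    pvPos velx lo ≤ highx

-- ===== PRECONDITION & SPEC =====
def Spec_x_hit (velx : Int) (lowx : Int) (highx : Int) (out : Bool) : Prop := out = x_hit_alt velx lowx highx
instance (velx : Int) (lowx : Int) (highx : Int) (out : Bool) : Decidable (Spec_x_hit velx lowx highx out) := by unfold Spec_x_hit; infer_instance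

-- ===== CLAIM (what is proved, stated in full; the proofs are below) =====
def Claim_equal_x_hit : Prop := ∀ (velx : Int) (lowx : Int) (highx : Int), Dom_x_hit velx lowx highx → Spec_x_hit velx lowx highx (x_hit velx lowx highx)

-- ===== LEMMAS AND PROOFS =====

-- exact division: k*(k-1) is even
theorem pvPos_succ (v k : Int) : pvPos v (k + 1) = pvPos v k + (v - k) := by
  have hev : ∃ c : Int, k * (k - 1) = 2 * c := by
    rcases Int.even_or_odd k with ⟨c, hc⟩ | ⟨c, hc⟩
    · exact ⟨c * (k - 1), by rw [hc]; ring⟩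
    · exact ⟨k * c, by rw [hc]; ring⟩
  obtain ⟨c, hc⟩ := hev
  have h1 : (k + 1) * (k + 1 - 1) = 2 * (c + k) := by rw [show (k+1) * (k+1-1) = k*(k-1) + 2*k by ring, hc]; ring
  unfold pvPos
  rw [h1, hc]
  have e1 : PySem.Int.floordiv (2 * (c + k)) 2 = c + k := by
    rw [PySem.Int.floordiv_eq_ediv_of_pos (by omega)]; omega
  have e2 : PySem.Int.floordiv (2 * c) 2 = c := by
    rw [PySem.Int.floordiv_eq_ediv_of_pos (by omega)]; omega
  rw [e1, e2]; ring

theorem pvPos_zero (v : Int) : pvPos v 0 = 0 := by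
  unfold pvPos
  simp

-- shift lemma: one loop step of A reindexes the positions
theorem pvPos_shift (v j : Int) : v + pvPos (v - 1) j = pvPos v (j + 1) := by
  have h1 : pvPos v (j + 1) = pvPos v j + (v - j) := pvPos_succ v j
  have h2 : pvPos (v - 1) j = pvPos v j - j := by
    unfold pvPos; ring
  omega

-- monotone on [0, v]
theorem pvPos_mono (v : Int) : ∀ (n : ℕ) (j : Int), 0 ≤ j → j + n ≤ v → pvPos v j ≤ pvPos v (j + n) := by
  intro n
  induction n with
  | zero => intro j _ _; simp
  | succ m ih =>
    intro j hj hle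
    have h1 : pvPos v j ≤ pvPos v (j + m) := ih j hj (by push_cast at hle ⊢; omega)
    have h2 : pvPos v (j + m + 1) = pvPos v (j + m) + (v - (j + m)) := pvPos_succ v (j + m)
    have : (j : Int) + (m + 1 : ℕ) = j + m + 1 := by push_cast; ring
    rw [this]
    push_cast at hle
    omega

theorem pvPos_mono' (v j k : Int) (hj : 0 ≤ j) (hjk : j ≤ k) (hk : k ≤ v) :
    pvPos v j ≤ pvPos v k := by
  have h := pvPos_mono v (k - j).toNat j hj (by omega)
  have : (j : Int) + ((k - j).toNat : Int) = k := by omega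
  rwa [this] at h

-- characterisation of A's loop
theorem x_hit_go_iff (lowx highx : Int) : ∀ (n : ℕ) (v x : Int), v ≤ n →
    (x_hit_go v x lowx highx = true ↔
      ∃ j : Int, 0 ≤ j ∧ j ≤ v ∧ lowx ≤ x + pvPos v j ∧ x + pvPos v j ≤ highx) := by
  intro n
  induction n with
  | zero =>
    intro v x hv
    rw [x_hit_go]
    by_cases h0 : 0 ≤ v
    · have hv0 : v = 0 := le_antisymm (by exact_mod_cast hv) h0
      subst hv0
      simp only [if_pos (le_refl (0:Int))]
      constructor
      · intro h
        split_ifs at h with hin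
        · exact ⟨0, le_refl _, le_refl _, by rw [pvPos_zero]; simpa using hin.1, by rw [pvPos_zero]; simpa using hin.2⟩
        · -- recursive call with v = -1 < 0 returns false
          rw [x_hit_go] at h; simp at h
      · rintro ⟨j, hj0, hjv, hl, hh⟩
        have : j = 0 := le_antisymm hjv hj0
        subst this
        rw [pvPos_zero] at hl hh
        simp at hl hh
        rw [if_pos ⟨hl, hh⟩]
    · rw [if_neg h0]
      constructor
      · intro h; exact absurd h (by simp)
      · rintro ⟨j, hj0, hjv, _, _⟩; omega
  | succ m ih =>
    intro v x hv
    by_cases h0 : 0 ≤ v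
    · by_cases hvm : v ≤ (m : Int)
      · exact ih v x hvm
      · have hveq : v = (m : Int) + 1 := by push_cast at hv; omega
        rw [x_hit_go, if_pos h0]
        by_cases hin : lowx ≤ x ∧ x ≤ highx
        · rw [if_pos hin]
          constructor
          · intro _
            exact ⟨0, le_refl _, h0, by rw [pvPos_zero]; simpa using hin.1, by rw [pvPos_zero]; simpa using hin.2⟩
          · intro _; rfl
        · rw [if_neg hin]
          have hrec := ih (v - 1) (x + v) (by omega)
          rw [hrec]
          constructor
          · rintro ⟨j, hj0, hjv, hl, hh⟩
            refine ⟨j + 1, by omega, by omega, ?_, ?_⟩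
            · have := pvPos_shift v j; omega
            · have := pvPos_shift v j; omega
          · rintro ⟨j, hj0, hjv, hl, hh⟩
            have hjne : j ≠ 0 := by
              intro hj; subst hj
              rw [pvPos_zero] at hl hh
              exact hin ⟨by simpa using hl, by simpa using hh⟩
            refine ⟨j - 1, by omega, by omega, ?_, ?_⟩
            · have := pvPos_shift v (j - 1); simp at this; omega
            · have := pvPos_shift v (j - 1); simp at this; omega
    · rw [x_hit_go, if_neg h0]
      constructor
      · intro h; exact absurd h (by simp)
      · rintro ⟨j, hj0, hjv, _, _⟩; omega

-- binary-search invariant: result is the least index with pos ≥ lowx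
theorem x_hit_bs_spec (v lowx : Int) : ∀ (n : ℕ) (lo hi : Int), (hi - lo).toNat ≤ n →
    0 ≤ lo → lo ≤ hi → hi ≤ v → lowx ≤ pvPos v hi →
    (lo ≤ x_hit_bs v lowx lo hi ∧ x_hit_bs v lowx lo hi ≤ hi ∧
     lowx ≤ pvPos v (x_hit_bs v lowx lo hi) ∧
     ∀ k, lo ≤ k → k < x_hit_bs v lowx lo hi → pvPos v k < lowx) := by
  intro n
  induction n with
  | zero =>
    intro lo hi hn h0 hle hhv hhi
    have : lo = hi := by omega
    subst this
    rw [x_hit_bs, if_neg (by omega)]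
    exact ⟨le_refl _, le_refl _, hhi, fun k hk1 hk2 => by omega⟩
  | succ m ih =>
    intro lo hi hn h0 hle hhv hhi
    by_cases hlt : lo < hi
    · rw [x_hit_bs, if_pos hlt]
      have hmid := PySem.Int.floordiv_two_mid_bounds (lo := lo) (hi := hi) (by omega)
      set mid := PySem.Int.floordiv (lo + hi) 2 with hmiddef
      have hmidlt : mid < hi := by
        have : PySem.Int.floordiv (lo + hi) 2 < hi := by
          rw [PySem.Int.floordiv_eq_ediv_of_pos (by omega)]; omega
        omega
      by_cases hb : lowx ≤ pvPos v mid
      · rw [if_pos hb]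
        obtain ⟨h1, h2, h3, h4⟩ := ih lo mid (by omega) h0 (by omega) (by omega) hb
        exact ⟨h1, by omega, h3, h4⟩
      · rw [if_neg hb]
        obtain ⟨h1, h2, h3, h4⟩ := ih (mid + 1) hi (by omega) (by omega) (by omega) hhv hhi
        refine ⟨by omega, h2, h3, ?_⟩
        intro k hk1 hk2
        by_cases hkm : k ≤ mid
        · have := pvPos_mono' v k mid (by omega) hkm (by omega)
          omega
        · exact h4 k (by omega) hk2
    · rw [x_hit_bs, if_neg hlt]
      refine ⟨le_refl _, by omega, ?_, fun k hk1 hk2 => by omega⟩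
      have heq : lo = hi := by omega
      rw [heq]; exact hhi

-- B's characterisation
theorem x_hit_alt_iff (v lowx highx : Int) :
    x_hit_alt v lowx highx = true ↔
      ∃ j : Int, 0 ≤ j ∧ j ≤ v ∧ lowx ≤ pvPos v j ∧ pvPos v j ≤ highx := by
  unfold x_hit_alt
  by_cases hneg : v < 0
  · rw [if_pos hneg]
    constructor
    · intro h; exact absurd h (by simp)
    · rintro ⟨j, hj0, hjv, _, _⟩; omega
  · rw [if_neg hneg]
    by_cases htop : pvPos v v < lowx
    · rw [if_pos htop]
      constructor
      · intro h; exact absurd h (by simp)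
      · rintro ⟨j, hj0, hjv, hl, _⟩
        have := pvPos_mono' v j v hj0 hjv (le_refl v)
        omega
    · rw [if_neg htop]
      obtain ⟨h1, h2, h3, h4⟩ := x_hit_bs_spec v lowx (v - 0).toNat 0 v (le_refl _)
        (le_refl _) (by omega) (le_refl _) (by omega)
      set r := x_hit_bs v lowx 0 v with hr
      simp only [decide_eq_true_eq]
      constructor
      · intro hle
        exact ⟨r, h1, h2, h3, hle⟩
      · rintro ⟨j, hj0, hjv, hl, hh⟩
        have hjr : r ≤ j := by
          by_contra hc
          exact absurd hl (by simpa using h4 j hj0 (by omega))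
        have := pvPos_mono' v r j h1 hjr hjv
        omega

-- ===== VERDICT (by name: the statement is the Claim_ definition above) =====
theorem x_hit_spec : Claim_equal_x_hit := by
  intro velx lowx highx _
  unfold Spec_x_hit
  have hA := x_hit_go_iff lowx highx (max velx 0).toNat velx 0 (by omega)
  have hB := x_hit_alt_iff velx lowx highx
  simp only [zero_add] at hA
  unfold x_hit
  rw [Bool.eq_iff_iff, hA, hB]
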